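-- pv_equiv track=rewrite | github.com/gengor-git/advent-of-code-2024 | day07/calibration_operators.py | check_dual_equation
-- ===== SOURCE A (Python) =====
-- def check_dual_equation(target: int, numbers):
--     if len(numbers) == 1: # list is added/multiplied in total
--         return target == numbers[0]
--     a, b = numbers[:2] # first two in the array
--     return (
--         check_dual_equation(target, [a + b, *numbers[2:]])
--         or check_dual_equation(target, [a * b, *numbers[2:]])
--     )
-- ===== SOURCE B (Python) =====
-- def check_dual_equation(target: int, numbers):
--     reachable = {numbers[0]}
--     for n in numbers[1:]:
--         reachable = {x + n for x in reachable} | {x * n for x in reachable}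
--     return target in reachable
-- ===== Notes on version B (the rewrite author's own statement) =====
-- stated objective: simpler
-- what changed: Replaces the binary recursion over operator choices with a single left-to-right loop maintaining the set of reachable partial results, returning membership of target at the end.
import Mathlib
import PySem

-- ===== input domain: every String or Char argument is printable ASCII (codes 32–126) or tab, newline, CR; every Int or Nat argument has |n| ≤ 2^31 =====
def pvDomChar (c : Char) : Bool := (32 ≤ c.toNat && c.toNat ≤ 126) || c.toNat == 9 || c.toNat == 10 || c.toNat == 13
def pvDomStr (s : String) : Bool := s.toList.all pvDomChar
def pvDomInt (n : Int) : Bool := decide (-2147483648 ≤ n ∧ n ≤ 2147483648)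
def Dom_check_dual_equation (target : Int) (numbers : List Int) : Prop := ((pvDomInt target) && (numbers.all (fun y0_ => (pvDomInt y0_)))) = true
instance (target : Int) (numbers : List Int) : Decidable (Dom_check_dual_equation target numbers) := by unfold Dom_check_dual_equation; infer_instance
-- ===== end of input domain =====

-- B replaces A's exponential binary recursion over +/* choices with one forward pass
-- maintaining the set of reachable partial results (objective: simpler).
-- Both A and B raise on numbers = [] (ValueError / IndexError); Pre_ excludes it.

-- ===== PORT A =====
def check_dual_equation (target : Int) (numbers : List Int) : Bool :=
  match numbers with
  | [] => false  -- A raises ValueError here (tuple unpack); outside Pre_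
  | [a] => target == a
  | a :: b :: rest =>
      check_dual_equation target ((a + b) :: rest) || check_dual_equation target ((a * b) :: rest)
termination_by numbers.length
decreasing_by all_goals simp

-- ===== PORT B =====
-- one step of the forward pass: {x + n for x in s} | {x * n for x in s}
def pvStep (s : PySem.Set Int) (n : Int) : PySem.Set Int :=
  PySem.Set.union (PySem.Set.ofList (s.map (· + n))) (s.map (· * n))

def check_dual_equation_alt (target : Int) (numbers : List Int) : Bool :=
  match numbers with
  | [] => false  -- B raises IndexError here (numbers[0]); outside Pre_
  | h :: t => PySem.Set.contains (t.foldl pvStep (PySem.Set.ofList [h])) target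

-- ===== PRECONDITION & SPEC =====
def Pre_check_dual_equation (_target : Int) (numbers : List Int) : Prop := numbers ≠ []
instance (target : Int) (numbers : List Int) : Decidable (Pre_check_dual_equation target numbers) := by unfold Pre_check_dual_equation; infer_instance
def pvWitness_check_dual_equation : Int × List Int := (6, [2, 3])

def Spec_check_dual_equation (target : Int) (numbers : List Int) (out : Bool) : Prop := out = check_dual_equation_alt target numbers
instance (target : Int) (numbers : List Int) (out : Bool) : Decidable (Spec_check_dual_equation target numbers out) := by unfold Spec_check_dual_equation; infer_instance

-- ===== CLAIM (what is proved, stated in full; the proofs are below) =====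
def Claim_equal_check_dual_equation : Prop := ∀ (target : Int) (numbers : List Int), Dom_check_dual_equation target numbers → Pre_check_dual_equation target numbers → Spec_check_dual_equation target numbers (check_dual_equation target numbers)

-- ===== LEMMAS AND PROOFS =====

theorem mem_pvStep {s : PySem.Set Int} {n x : Int} :
    x ∈ pvStep s n ↔ ∃ y ∈ s, x = y + n ∨ x = y * n := by
  simp only [pvStep, PySem.Set.mem_union, PySem.Set.mem_ofList, List.mem_map]
  constructor
  · rintro (⟨y, hy, rfl⟩ | ⟨y, hy, rfl⟩) <;> exact ⟨y, hy, by simp⟩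
  · rintro ⟨y, hy, rfl | rfl⟩
    · exact Or.inl ⟨y, hy, rfl⟩
    · exact Or.inr ⟨y, hy, rfl⟩

theorem reach_iff (target : Int) (rest : List Int) :
    ∀ (s : PySem.Set Int),
      target ∈ rest.foldl pvStep s ↔ ∃ x ∈ s, check_dual_equation target (x :: rest) = true := by
  induction rest with
  | nil =>
      intro s
      simp only [List.foldl_nil, check_dual_equation, beq_iff_eq]
      constructor
      · intro h; exact ⟨target, h, rfl⟩
      · rintro ⟨x, hx, rfl⟩; exact hx
  | cons n rs ih =>
      intro s
      simp only [List.foldl_cons]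
      rw [ih (pvStep s n)]
      constructor
      · rintro ⟨x, hx, hck⟩
        obtain ⟨y, hy, rfl | rfl⟩ := mem_pvStep.mp hx
        · exact ⟨y, hy, by simp [check_dual_equation, hck]⟩
        · exact ⟨y, hy, by simp [check_dual_equation, hck]⟩
      · rintro ⟨y, hy, hck⟩
        simp only [check_dual_equation, Bool.or_eq_true] at hck
        rcases hck with h | h
        · exact ⟨y + n, mem_pvStep.mpr ⟨y, hy, Or.inl rfl⟩, h⟩
        · exact ⟨y * n, mem_pvStep.mpr ⟨y, hy, Or.inr rfl⟩, h⟩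

-- ===== VERDICT (by name: the statement is the Claim_ definition above) =====
theorem check_dual_equation_spec : Claim_equal_check_dual_equation := by
  intro target numbers _ hpre
  unfold Spec_check_dual_equation
  match numbers with
  | [] => exact absurd rfl hpre
  | h :: t =>
      have key := reach_iff target t (PySem.Set.ofList [h])
      show check_dual_equation target (h :: t)
        = PySem.Set.contains (t.foldl pvStep (PySem.Set.ofList [h])) target
      rw [Bool.eq_iff_iff]
      simp only [PySem.Set.contains_iff, key, PySem.Set.mem_ofList, List.mem_singleton]
      constructor
      · intro hc; exact ⟨h, rfl, hc⟩
      · rintro ⟨x, rfl, hc⟩; exact hc
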